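-- pv_equiv track=rewrite | github.com/maci2233/Competitive_programming | CodeForces/A/448a.py | shelves_fit
-- ===== SOURCE A (Python) =====
-- def shelves_fit(cups, medals, shelves):
--     while shelves > 0 and cups > 0 or medals > 0:
--         if shelves == 0:
--             return "NO"
--         if cups > 0:
--             cups-=5
--             shelves-=1
--         elif medals > 0:
--             medals-=10
--             shelves-=1
--     if cups <= 0 and medals <= 0:
--         return "YES"
--     else:
--         return "NO"
-- ===== SOURCE B (Python) =====
-- def shelves_fit(cups, medals, shelves):
--     need = (max(cups, 0) + 4) // 5 + (max(medals, 0) + 9) // 10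
--     return "YES" if need == 0 or need <= shelves else "NO"
-- ===== Notes on version B (the rewrite author's own statement) =====
-- stated objective: faster
-- what changed: Replaced the subtract-5/subtract-10 simulation loop with a closed-form shelf count ceil(cups/5)+ceil(medals/10) compared against shelves.
-- intended difference: When shelves < 0 and medals > 0, A returns 'YES' because its loop only tests shelves == 0 and keeps decrementing past zero, while B returns 'NO', the intended answer since medals needing at least one shelf cannot fit on a negative number of shelves. — e.g. on shelves_fit(0, 5, -1): A returns "YES", B returns "NO"
import Mathlib
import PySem

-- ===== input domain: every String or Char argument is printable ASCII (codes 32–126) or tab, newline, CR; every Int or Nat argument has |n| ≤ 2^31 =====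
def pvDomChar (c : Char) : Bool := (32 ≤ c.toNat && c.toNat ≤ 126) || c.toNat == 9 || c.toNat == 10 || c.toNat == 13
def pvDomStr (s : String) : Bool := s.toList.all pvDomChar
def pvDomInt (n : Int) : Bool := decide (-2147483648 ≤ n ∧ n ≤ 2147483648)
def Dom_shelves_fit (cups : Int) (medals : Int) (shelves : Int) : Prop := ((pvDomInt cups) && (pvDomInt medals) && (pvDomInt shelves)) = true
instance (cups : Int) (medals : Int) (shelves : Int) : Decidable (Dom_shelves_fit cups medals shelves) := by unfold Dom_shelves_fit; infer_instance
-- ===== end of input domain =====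

-- B replaces A's subtract-in-a-loop simulation by the closed form ceil(cups/5)+ceil(medals/10) ≤ shelves (asymptotically faster);
-- on shelves < 0 with medals > 0 A accidentally returns "YES", B returns the intended "NO" (see D_ below).


-- ===== PORT A =====
-- the while loop of A, state (cups, medals, shelves); fuel is only a totality guard: every iteration
-- shrinks cups.toNat + medals.toNat, so the fuel passed below is never exhausted before the loop exits
def shelvesFitLoop (fuel : Nat) (cups : Int) (medals : Int) (shelves : Int) : String :=
  match fuel with
  | Nat.succ f =>
    if (shelves > 0 ∧ cups > 0) ∨ medals > 0 then
      if shelves = 0 then "NO"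
      else if cups > 0 then shelvesFitLoop f (cups - 5) medals (shelves - 1)
      else if medals > 0 then shelvesFitLoop f cups (medals - 10) (shelves - 1)
      else -- unreachable: the loop guard with cups ≤ 0 forces medals > 0
        if cups ≤ 0 ∧ medals ≤ 0 then "YES" else "NO"
    else
      if cups ≤ 0 ∧ medals ≤ 0 then "YES" else "NO"
  | Nat.zero => -- fuel 0 means cups ≤ 0 and medals ≤ 0, where the loop guard is false anyway
    if cups ≤ 0 ∧ medals ≤ 0 then "YES" else "NO"

def shelves_fit (cups : Int) (medals : Int) (shelves : Int) : String :=
  shelvesFitLoop (cups.toNat + medals.toNat) cups medals shelves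

-- ===== PORT B =====
def shelves_fit_alt (cups : Int) (medals : Int) (shelves : Int) : String :=
  let need := PySem.Int.floordiv (max cups 0 + 4) 5 + PySem.Int.floordiv (max medals 0 + 9) 10
  if need = 0 ∨ need ≤ shelves then "YES" else "NO"

-- ===== PRECONDITION & SPEC =====
-- When shelves < 0 and medals > 0, A returns "YES" (its loop only tests shelves == 0 and decrements past zero),
-- B returns "NO", the intended answer: medals needing at least one shelf cannot fit on a negative number of shelves.
def D_shelves_fit (cups : Int) (medals : Int) (shelves : Int) : Prop := shelves < 0 ∧ medals > 0
instance (cups : Int) (medals : Int) (shelves : Int) : Decidable (D_shelves_fit cups medals shelves) := by unfold D_shelves_fit; infer_instance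

def Spec_shelves_fit (cups : Int) (medals : Int) (shelves : Int) (out : String) : Prop := ¬ D_shelves_fit cups medals shelves → out = shelves_fit_alt cups medals shelves
instance (cups : Int) (medals : Int) (shelves : Int) (out : String) : Decidable (Spec_shelves_fit cups medals shelves out) := by unfold Spec_shelves_fit; infer_instance

def pvDiffWitness_shelves_fit : Int × Int × Int := (0, 5, -1)
def pvDiffWitnessOut_shelves_fit : String × String := ("YES", "NO")

-- ===== CLAIM (what is proved, stated in full; the proofs are below) =====
def Claim_unchanged_shelves_fit : Prop := ∀ (cups : Int) (medals : Int) (shelves : Int), Dom_shelves_fit cups medals shelves → Spec_shelves_fit cups medals shelves (shelves_fit cups medals shelves)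
def Claim_changed_shelves_fit : Prop := Dom_shelves_fit (pvDiffWitness_shelves_fit.1) (pvDiffWitness_shelves_fit.2.1) (pvDiffWitness_shelves_fit.2.2) ∧ D_shelves_fit (pvDiffWitness_shelves_fit.1) (pvDiffWitness_shelves_fit.2.1) (pvDiffWitness_shelves_fit.2.2) ∧ shelves_fit (pvDiffWitness_shelves_fit.1) (pvDiffWitness_shelves_fit.2.1) (pvDiffWitness_shelves_fit.2.2) = pvDiffWitnessOut_shelves_fit.1 ∧ shelves_fit_alt (pvDiffWitness_shelves_fit.1) (pvDiffWitness_shelves_fit.2.1) (pvDiffWitness_shelves_fit.2.2) = pvDiffWitnessOut_shelves_fit.2 ∧ pvDiffWitnessOut_shelves_fit.1 ≠ pvDiffWitnessOut_shelves_fit.2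
def Claim_exact_shelves_fit : Prop := ∀ (cups : Int) (medals : Int) (shelves : Int), Dom_shelves_fit cups medals shelves → D_shelves_fit cups medals shelves → shelves_fit cups medals shelves ≠ shelves_fit_alt cups medals shelves

-- ===== LEMMAS AND PROOFS =====

-- B's condition with floordiv turned into Euclidean division (both divisors are positive)
theorem alt_eq (cups medals shelves : Int) :
    shelves_fit_alt cups medals shelves =
      (if (max cups 0 + 4) / 5 + (max medals 0 + 9) / 10 = 0 ∨
          (max cups 0 + 4) / 5 + (max medals 0 + 9) / 10 ≤ shelves then "YES" else "NO") := by
  simp only [shelves_fit_alt,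
    PySem.Int.floordiv_eq_ediv_of_pos (by omega : (0:Int) < 5),
    PySem.Int.floordiv_eq_ediv_of_pos (by omega : (0:Int) < 10)]

-- A's loop agrees with B outside the change region (induction on the loop measure)
theorem loop_eq_alt_aux (n : Nat) : ∀ (c m s : Int), c.toNat + m.toNat ≤ n →
    ¬ (s < 0 ∧ m > 0) → shelvesFitLoop n c m s = shelves_fit_alt c m s := by
  induction n with
  | zero =>
    intro c m s hn h
    rw [shelvesFitLoop, alt_eq]
    split_ifs <;> first | rfl | (exfalso; omega)
  | succ n ih =>
    intro c m s hn h
    rw [shelvesFitLoop]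
    split_ifs with h1 h2 h3 h4 h5
    · rw [alt_eq]; split_ifs <;> first | rfl | (exfalso; omega)
    · rw [ih (c - 5) m (s - 1) (by omega) (by omega), alt_eq, alt_eq]
      split_ifs <;> first | rfl | (exfalso; omega)
    · rw [ih c (m - 10) (s - 1) (by omega) (by omega), alt_eq, alt_eq]
      split_ifs <;> first | rfl | (exfalso; omega)
    · exfalso; omega   -- dead branch: guard with c ≤ 0 forces m > 0
    · exfalso; omega
    · rw [alt_eq]; split_ifs <;> first | rfl | (exfalso; omega)
    · rw [alt_eq]; split_ifs <;> first | rfl | (exfalso; omega)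

-- inside D_ (shelves < 0) A's loop always ends in "YES"
theorem loop_yes_aux (n : Nat) : ∀ (c m s : Int), c.toNat + m.toNat ≤ n → s < 0 →
    (m > 0 ∨ (c ≤ 0 ∧ m ≤ 0)) → shelvesFitLoop n c m s = "YES" := by
  induction n with
  | zero =>
    intro c m s hn hs hm
    rw [shelvesFitLoop]
    split_ifs <;> first | rfl | (exfalso; omega)
  | succ n ih =>
    intro c m s hn hs hm
    rw [shelvesFitLoop]
    split_ifs with h1 h2 h3 h4 h5
    · exfalso; omega
    · exact ih (c - 5) m (s - 1) (by omega) (by omega) (by omega)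
    · refine ih c (m - 10) (s - 1) (by omega) (by omega) ?_
      rcases hm with hm | hm <;> omega
    · rfl
    · exfalso; omega
    · rfl
    · exfalso; omega

theorem witness_A : shelves_fit 0 5 (-1) = "YES" := by
  have h5 : Int.toNat 0 + Int.toNat 5 = 5 := by decide
  rw [shelves_fit, h5]
  norm_num [shelvesFitLoop]

theorem witness_B : shelves_fit_alt 0 5 (-1) = "NO" := by
  rw [alt_eq]; norm_num

-- ===== VERDICT (by name: the statement is the Claim_ definition above) =====
theorem shelves_fit_spec : Claim_unchanged_shelves_fit := by
  intro c m s _ hD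
  exact loop_eq_alt_aux (c.toNat + m.toNat) c m s le_rfl hD

theorem shelves_fit_changed : Claim_changed_shelves_fit := by
  unfold Claim_changed_shelves_fit
  exact ⟨by decide, by decide, witness_A, witness_B, by simp [pvDiffWitnessOut_shelves_fit]⟩

theorem shelves_fit_tight : Claim_exact_shelves_fit := by
  intro c m s _ hD
  have hs : s < 0 := hD.1
  have hm : m > 0 := hD.2
  rw [shelves_fit, loop_yes_aux (c.toNat + m.toNat) c m s le_rfl hs (Or.inl hm), alt_eq]
  have hm10 : 1 ≤ (max m 0 + 9) / 10 := by omega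
  have hc5 : 0 ≤ (max c 0 + 4) / 5 := by omega
  intro hEq
  split_ifs at hEq with hif
  · omega
  · exact absurd hEq (by simp)
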